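-- pv_equiv track=rewrite | github.com/tsupinie/research | goshen/editNamelist.py | joinSplicedStrings
-- ===== SOURCE A (Python) =====
-- def joinSplicedStrings(spliced_list, delimiter=", "):
--     idx_start = 0
--     idx = idx_start
--     while idx < len(spliced_list):
--         if not ("".join(spliced_list[idx_start:(idx + 1)]).count("'") % 2) or idx == len(spliced_list) - 1:
--             spliced_list[idx_start:(idx + 1)] = [ delimiter.join(spliced_list[idx_start:(idx + 1)]) ]
--             idx_start += 1
--             idx = idx_start
--         else:
--             idx += 1
--     return spliced_list
-- ===== SOURCE B (Python) =====
-- def joinSplicedStrings(spliced_list, delimiter=", "):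
--     out = []
--     group = []
--     parity = 0
--     for s in spliced_list:
--         group.append(s)
--         parity = (parity + s.count("'")) % 2
--         if parity == 0:
--             out.append(delimiter.join(group))
--             group = []
--     if group:
--         out.append(delimiter.join(group))
--     return out
-- ===== Notes on version B (the rewrite author's own statement) =====
-- stated objective: faster
-- what changed: Replaces A's repeated re-join-and-recount of the growing slice plus quadratic slice-assignment rewrites with one left-to-right pass that keeps a running quote-count parity per group and joins each group exactly once.
import Mathlib
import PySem

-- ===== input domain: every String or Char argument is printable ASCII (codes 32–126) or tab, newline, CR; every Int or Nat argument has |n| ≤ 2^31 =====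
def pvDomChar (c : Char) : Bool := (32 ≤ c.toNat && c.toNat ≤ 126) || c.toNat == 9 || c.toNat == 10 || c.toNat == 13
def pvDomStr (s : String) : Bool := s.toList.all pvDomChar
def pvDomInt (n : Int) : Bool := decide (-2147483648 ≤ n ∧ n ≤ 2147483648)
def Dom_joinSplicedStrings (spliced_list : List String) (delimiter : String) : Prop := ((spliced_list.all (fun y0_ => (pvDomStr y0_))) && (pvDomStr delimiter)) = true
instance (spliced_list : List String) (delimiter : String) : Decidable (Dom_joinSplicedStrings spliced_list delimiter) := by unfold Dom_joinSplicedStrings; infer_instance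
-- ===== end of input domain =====

-- B replaces A's quadratic re-join/re-count of the growing slice (and its slice-assignment
-- rewrites of the list) with a single pass keeping a running quote-count parity per group.
-- A mutates its argument in place (slice assignment); the equivalence proved is about the
-- RETURN value only.

-- ===== PORT A =====
-- A's while loop: idx is represented as idx_start + k (idx resets to idx_start after a merge).
def joinSplicedStringsLoop (delimiter : String) (lst : List String) (s k : Nat) : List String :=
  if h : s + k < lst.length then
    if (PySem.Str.count (PySem.Str.join ""
          (PySem.List.slice lst (some (s : Int)) (some ((s : Int) + (k : Int) + 1)))) "'" % 2 == 0)
        || (s + k == lst.length - 1) then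
      joinSplicedStringsLoop delimiter
        (PySem.List.slice lst none (some (s : Int))
          ++ [PySem.Str.join delimiter
                (PySem.List.slice lst (some (s : Int)) (some ((s : Int) + (k : Int) + 1)))]
          ++ PySem.List.slice lst (some ((s : Int) + (k : Int) + 1)) none)
        (s + 1) 0
    else
      joinSplicedStringsLoop delimiter lst s (k + 1)
  else lst
termination_by (lst.length - s, lst.length - (s + k))
decreasing_by
  · left
    have hs : (PySem.List.slice lst none (some (s : Int))).length = s := by
      rw [PySem.List.slice_to_natCast]
      simp [List.length_take]; omega
    have hd : (PySem.List.slice lst (some ((s : Int) + (k : Int) + 1)) none).length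
        = lst.length - (s + k + 1) := by
      have : (s : Int) + (k : Int) + 1 = ((s + k + 1 : Nat) : Int) := by push_cast; ring
      rw [this, PySem.List.slice_from_natCast]
      simp [List.length_drop]
    simp only [List.length_append, hs, hd, List.length_singleton]
    omega
  · right
    omega

def joinSplicedStrings (spliced_list : List String) (delimiter : String) : List String :=
  joinSplicedStringsLoop delimiter spliced_list 0 0

-- ===== PORT B =====
def joinSplicedStringsStep (delimiter : String)
    (acc : List String × List String × Nat) (x : String) : List String × List String × Nat :=
  let group := acc.2.1 ++ [x]
  let parity := (acc.2.2 + PySem.Str.count x "'") % 2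
  if parity = 0 then (acc.1 ++ [PySem.Str.join delimiter group], [], 0)
  else (acc.1, group, parity)

def joinSplicedStrings_alt (spliced_list : List String) (delimiter : String) : List String :=
  let r := spliced_list.foldl (joinSplicedStringsStep delimiter) ([], [], 0)
  if r.2.1 = [] then r.1 else r.1 ++ [PySem.Str.join delimiter r.2.1]

-- ===== PRECONDITION & SPEC =====
def Spec_joinSplicedStrings (spliced_list : List String) (delimiter : String) (out : List String) : Prop := out = joinSplicedStrings_alt spliced_list delimiter
instance (spliced_list : List String) (delimiter : String) (out : List String) : Decidable (Spec_joinSplicedStrings spliced_list delimiter out) := by unfold Spec_joinSplicedStrings; infer_instance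

-- ===== CLAIM (what is proved, stated in full; the proofs are below) =====
def Claim_equal_joinSplicedStrings : Prop := ∀ (spliced_list : List String) (delimiter : String), Dom_joinSplicedStrings spliced_list delimiter → Spec_joinSplicedStrings spliced_list delimiter (joinSplicedStrings spliced_list delimiter)

-- ===== LEMMAS AND PROOFS =====

-- Python's s.count("'") for the single char "'" is the plain character count.
theorem countGo_single (c : Char) (l : List Char) : ∀ (fuel acc : Nat), l.length ≤ fuel →
    PySem.Chars.count.go [c] fuel l acc = acc + l.count c := by
  induction l with
  | nil => intro fuel acc _; cases fuel <;> simp [PySem.Chars.count.go]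
  | cons h t ih =>
    intro fuel acc hle
    cases fuel with
    | zero => simp at hle
    | succ f =>
      simp only [PySem.Chars.count.go]
      by_cases hc : c = h
      · subst hc
        simp only [List.isPrefixOf, BEq.rfl, Bool.true_and, if_true,
          List.length_singleton, List.drop_succ_cons, List.drop_zero]
        rw [ih f (acc + 1) (by simp at hle; omega)]
        simp
        omega
      · have : ([c].isPrefixOf (h :: t)) = false := by
          simp only [List.isPrefixOf, Bool.and_true]
          exact beq_eq_false_iff_ne.mpr hc
        rw [this]
        simp only [Bool.false_eq_true, if_false]
        rw [ih f acc (by simp at hle; omega)]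
        simp [List.count_cons]
        exact fun hh => hc hh.symm

theorem count_single (c : Char) (l : List Char) : PySem.Chars.count l [c] = l.count c := by
  simp [PySem.Chars.count]
  simpa using countGo_single c l l.length 0 le_rfl

theorem flatten_intersperse_nil {α : Type} : ∀ (l : List (List α)),
    (List.intersperse ([] : List α) l).flatten = l.flatten
  | [] => rfl
  | [a] => by simp
  | a :: b :: t => by
    simp [List.intersperse, flatten_intersperse_nil (b :: t)]

-- quote count of "".join(parts) = sum of per-part quote counts
theorem count_join_quote (parts : List String) :
    PySem.Str.count (PySem.Str.join "" parts) "'" =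
      (parts.map (fun s => PySem.Str.count s "'")).sum := by
  rw [PySem.Str.count_eq, PySem.Str.toList_join]
  have hq : ("'" : String).toList = ['\''] := rfl
  have he : ("" : String).toList = [] := rfl
  rw [hq, he, count_single]
  have : PySem.Chars.join [] (parts.map String.toList) = (parts.map String.toList).flatten := by
    simp [PySem.Chars.join, List.intercalate, flatten_intersperse_nil]
  rw [this, List.count_flatten]
  rw [List.map_map]
  congr 1
  apply List.map_congr_left
  intro s _
  rw [Function.comp_apply, PySem.Str.count_eq, hq, count_single]

-- B's fold continued from an arbitrary state, as a recursion (proof-side view of B).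
def goB (delimiter : String) (out group : List String) (parity : Nat) : List String → List String
  | [] => if group = [] then out else out ++ [PySem.Str.join delimiter group]
  | x :: xs =>
    let g := group ++ [x]
    let p := (parity + PySem.Str.count x "'") % 2
    if p = 0 then goB delimiter (out ++ [PySem.Str.join delimiter g]) [] 0 xs
    else goB delimiter out g p xs

theorem goB_eq_foldl (delimiter : String) :
    ∀ (rest out group : List String) (parity : Nat),
    goB delimiter out group parity rest =
      (let r := rest.foldl (joinSplicedStringsStep delimiter) (out, group, parity)
       if r.2.1 = [] then r.1 else r.1 ++ [PySem.Str.join delimiter r.2.1]) := by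
  intro rest
  induction rest with
  | nil => intro out group parity; simp [goB]
  | cons x xs ih =>
    intro out group parity
    simp only [goB, List.foldl_cons]
    by_cases hp : (parity + PySem.Str.count x "'") % 2 = 0
    · rw [if_pos hp, ih]
      simp only [joinSplicedStringsStep]
      rw [if_pos hp]
    · rw [if_neg hp, ih]
      simp only [joinSplicedStringsStep]
      rw [if_neg hp]

def quoteParity (group : List String) : Nat :=
  (group.map (fun s => PySem.Str.count s "'")).sum % 2

-- The main bridge: A's loop from a state (done flushed, group scanned, rest to come)
-- computes goB on the same state.
theorem loopA_eq_goB (delimiter : String) :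
    ∀ (rest done group : List String),
    (group = [] ∨ rest ≠ []) →
    joinSplicedStringsLoop delimiter (done ++ (group ++ rest)) done.length group.length =
      goB delimiter done group (quoteParity group) rest := by
  intro rest
  induction rest with
  | nil =>
    intro done group hg
    rcases hg with hg | hg
    · subst hg
      rw [joinSplicedStringsLoop]
      simp [goB]
    · exact absurd rfl hg
  | cons x xs ih =>
    intro done group _
    rw [joinSplicedStringsLoop]
    have hlen : (done ++ (group ++ x :: xs)).length
        = done.length + group.length + (xs.length + 1) := by simp; omega
    have hlt : done.length + group.length < (done ++ (group ++ x :: xs)).length := by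
      rw [hlen]; omega
    have hcast : (done.length : Int) + (group.length : Int) + 1
        = ((done.length + group.length + 1 : Nat) : Int) := by push_cast; ring
    have hsliceg : PySem.List.slice (done ++ (group ++ x :: xs)) (some (done.length : Int))
        (some ((done.length : Int) + (group.length : Int) + 1)) = group ++ [x] := by
      rw [hcast, PySem.List.slice_natCast, List.drop_left]
      have : group ++ x :: xs = (group ++ [x]) ++ xs := by simp
      rw [this]
      have hl : done.length + group.length + 1 - done.length = (group ++ [x]).length := by
        simp only [List.length_append, List.length_singleton]; omega
      rw [hl, List.take_left]
    have hslicel : PySem.List.slice (done ++ (group ++ x :: xs)) none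
        (some (done.length : Int)) = done := by
      rw [PySem.List.slice_to_natCast, List.take_left]
    have hslicer : PySem.List.slice (done ++ (group ++ x :: xs))
        (some ((done.length : Int) + (group.length : Int) + 1)) none = xs := by
      rw [hcast, PySem.List.slice_from_natCast]
      have : done ++ (group ++ x :: xs) = (done ++ (group ++ [x])) ++ xs := by simp
      rw [this]
      have hl : done.length + group.length + 1 = (done ++ (group ++ [x])).length := by
        simp only [List.length_append, List.length_singleton]; omega
      rw [hl, List.drop_left]
    have hcnt : PySem.Str.count (PySem.Str.join "" (group ++ [x])) "'" =
        (group.map (fun s => PySem.Str.count s "'")).sum + PySem.Str.count x "'" := by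
      rw [count_join_quote]; simp
    have hparity : (PySem.Str.count (PySem.Str.join "" (group ++ [x])) "'" % 2 = 0)
        ↔ ((quoteParity group + PySem.Str.count x "'") % 2 = 0) := by
      rw [hcnt]; unfold quoteParity; omega
    rw [dif_pos hlt, hsliceg, hslicel, hslicer]
    simp only [goB]
    by_cases hp : (quoteParity group + PySem.Str.count x "'") % 2 = 0
    · have hc : ((PySem.Str.count (PySem.Str.join "" (group ++ [x])) "'" % 2 == 0)
          || (done.length + group.length == (done ++ (group ++ x :: xs)).length - 1)) = true := by
        rw [Bool.or_eq_true, beq_iff_eq]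
        exact Or.inl (hparity.mpr hp)
      rw [if_pos hc, if_pos hp]
      have := ih (done ++ [PySem.Str.join delimiter (group ++ [x])]) []
        (Or.inl rfl)
      simp only [List.nil_append, List.length_append, List.length_singleton, List.length_nil] at this
      rw [List.append_assoc] at this
      simpa [quoteParity] using this
    · by_cases hx : xs = []
      · subst hx
        have hc : ((PySem.Str.count (PySem.Str.join "" (group ++ [x])) "'" % 2 == 0)
            || (done.length + group.length == (done ++ (group ++ x :: [])).length - 1)) = true := by
          rw [Bool.or_eq_true]
          right
          rw [beq_iff_eq]
          simp only [List.length_append, List.length_cons, List.length_nil]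
          omega
        rw [if_pos hc, if_neg hp]
        rw [joinSplicedStringsLoop]
        rw [dif_neg (by simp)]
        simp [goB]
      · have hc : ((PySem.Str.count (PySem.Str.join "" (group ++ [x])) "'" % 2 == 0)
            || (done.length + group.length == (done ++ (group ++ x :: xs)).length - 1)) = false := by
          simp only [Bool.or_eq_false_iff, beq_eq_false_iff_ne]
          constructor
          · exact fun h => hp (hparity.mp h)
          · rw [hlen]
            have : xs.length ≥ 1 := by
              cases xs with
              | nil => exact absurd rfl hx
              | cons a b => simp
            omega
        rw [if_neg (ne_true_of_eq_false hc), if_neg hp]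
        have := ih done (group ++ [x]) (Or.inr hx)
        simp only [List.length_append, List.length_singleton] at this
        rw [List.append_assoc] at this
        have hq : quoteParity (group ++ [x])
            = (quoteParity group + PySem.Str.count x "'") % 2 := by
          unfold quoteParity; simp
        rw [hq] at this
        simpa using this

-- ===== VERDICT (by name: the statement is the Claim_ definition above) =====
theorem joinSplicedStrings_spec : Claim_equal_joinSplicedStrings := by
  intro spliced_list delimiter _
  unfold Spec_joinSplicedStrings joinSplicedStrings joinSplicedStrings_alt
  have h := loopA_eq_goB delimiter spliced_list [] [] (Or.inl rfl)
  simp only [List.nil_append, List.length_nil] at h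
  have h0 : quoteParity [] = 0 := rfl
  rw [h0] at h
  rw [h, goB_eq_foldl]
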